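-- pv_equiv track=rewrite | github.com/ArchipelagoMW/Archipelago | worlds/shapez/locations.py | color_to_needed_building
-- ===== SOURCE A (Python) =====
-- from typing import List, Tuple, Dict
--
-- def color_to_needed_building(color_list: List[str]) -> str:
--     for next_color in color_list:
--         if next_color in ["Yellow", "Purple", "Cyan", "White", "y", "p", "c", "w"]:
--             return "Mixed"
--     for next_color in color_list:
--         if next_color not in ["Uncolored", "u"]:
--             return "Painted"
--     return "Uncolored"
-- ===== SOURCE B (Python) =====
-- def color_to_needed_building(color_list):
--     saw_painted = False
--     for next_color in color_list:
--         if next_color in ("Yellow", "Purple", "Cyan", "White", "y", "p", "c", "w"):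
--             return "Mixed"
--         if next_color not in ("Uncolored", "u"):
--             saw_painted = True
--     return "Painted" if saw_painted else "Uncolored"
-- ===== Notes on version B (the rewrite author's own statement) =====
-- stated objective: simpler
-- what changed: Replaces A's two separate passes over color_list with a single fused pass that keeps a saw_painted flag, returning Mixed immediately and classifying Painted/Uncolored from the flag at the end.
import Mathlib
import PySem

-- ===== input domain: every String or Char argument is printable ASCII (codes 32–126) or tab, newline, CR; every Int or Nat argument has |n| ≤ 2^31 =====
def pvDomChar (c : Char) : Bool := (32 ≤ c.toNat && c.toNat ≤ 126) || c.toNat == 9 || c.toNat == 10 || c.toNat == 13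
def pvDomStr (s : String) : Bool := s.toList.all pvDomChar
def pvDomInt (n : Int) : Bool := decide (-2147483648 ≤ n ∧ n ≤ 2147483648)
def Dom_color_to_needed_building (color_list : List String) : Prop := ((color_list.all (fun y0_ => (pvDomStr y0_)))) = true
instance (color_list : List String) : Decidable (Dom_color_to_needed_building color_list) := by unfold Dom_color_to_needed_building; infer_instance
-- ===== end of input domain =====

-- B fuses A's two passes into one loop with a saw_painted flag (objective: simpler).

-- ===== PORT A =====
-- first loop of A: return "Mixed" on the first color found in the mixed list
def aLoop1 : List String → Option String
  | [] => none
  | c :: rest =>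
    if c ∈ ["Yellow", "Purple", "Cyan", "White", "y", "p", "c", "w"] then some "Mixed"
    else aLoop1 rest

-- second loop of A: return "Painted" on the first color not in ["Uncolored","u"]
def aLoop2 : List String → Option String
  | [] => none
  | c :: rest =>
    if c ∉ ["Uncolored", "u"] then some "Painted"
    else aLoop2 rest

def color_to_needed_building (color_list : List String) : String :=
  match aLoop1 color_list with
  | some s => s
  | none =>
    match aLoop2 color_list with
    | some s => s
    | none => "Uncolored"

-- ===== PORT B =====
-- single pass carrying the saw_painted flag
def bLoop : List String → Bool → String
  | [], saw_painted => if saw_painted then "Painted" else "Uncolored"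
  | c :: rest, saw_painted =>
    if c ∈ ["Yellow", "Purple", "Cyan", "White", "y", "p", "c", "w"] then "Mixed"
    else bLoop rest (saw_painted || decide (c ∉ ["Uncolored", "u"]))

def color_to_needed_building_alt (color_list : List String) : String :=
  bLoop color_list false

-- ===== PRECONDITION & SPEC =====
def Spec_color_to_needed_building (color_list : List String) (out : String) : Prop := out = color_to_needed_building_alt color_list
instance (color_list : List String) (out : String) : Decidable (Spec_color_to_needed_building color_list out) := by unfold Spec_color_to_needed_building; infer_instance

-- ===== CLAIM (what is proved, stated in full; the proofs are below) =====
def Claim_equal_color_to_needed_building : Prop := ∀ (color_list : List String), Dom_color_to_needed_building color_list → Spec_color_to_needed_building color_list (color_to_needed_building color_list)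

-- ===== LEMMAS AND PROOFS =====
theorem bLoop_char (l : List String) : ∀ saw : Bool,
    bLoop l saw =
      if (aLoop1 l).isSome then "Mixed"
      else if saw || (aLoop2 l).isSome then "Painted" else "Uncolored" := by
  induction l with
  | nil => intro saw; simp [bLoop, aLoop1, aLoop2]
  | cons c rest ih =>
    intro saw
    by_cases hm : c ∈ ["Yellow", "Purple", "Cyan", "White", "y", "p", "c", "w"]
    · simp [bLoop, aLoop1, hm]
    · by_cases hu : c ∈ ["Uncolored", "u"]
      · simp [bLoop, aLoop1, aLoop2, hm, hu, ih]
      · simp [bLoop, aLoop1, aLoop2, hm, hu, ih]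

theorem aLoop1_mixed : ∀ (l : List String) (s : String), aLoop1 l = some s → s = "Mixed" := by
  intro l
  induction l with
  | nil => intro s h; simp [aLoop1] at h
  | cons c rest ih =>
    intro s h
    by_cases hm : c ∈ ["Yellow", "Purple", "Cyan", "White", "y", "p", "c", "w"]
    · simp [aLoop1, hm] at h; exact h.symm
    · exact ih s (by simpa [aLoop1, hm] using h)

theorem aLoop2_painted : ∀ (l : List String) (s : String), aLoop2 l = some s → s = "Painted" := by
  intro l
  induction l with
  | nil => intro s h; simp [aLoop2] at h
  | cons c rest ih =>
    intro s h
    by_cases hu : c ∈ ["Uncolored", "u"]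
    · exact ih s (by simpa [aLoop2, hu] using h)
    · simp [aLoop2, hu] at h; exact h.symm

-- ===== VERDICT (by name: the statement is the Claim_ definition above) =====
theorem color_to_needed_building_spec : Claim_equal_color_to_needed_building := by
  intro l _
  unfold Spec_color_to_needed_building color_to_needed_building color_to_needed_building_alt
  rw [bLoop_char]
  cases h1 : aLoop1 l with
  | some s => have hs := aLoop1_mixed l s h1; subst hs; simp
  | none =>
    cases h2 : aLoop2 l with
    | some s => have hs := aLoop2_painted l s h2; subst hs; simp
    | none => simp
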